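-- pv_equiv track=rewrite | github.com/L2VE/L2VE | langgraph-scanner/src/agents/discovery_agent/nodes.py | _prune_message_history
-- ===== SOURCE A (Python) =====
-- from typing import List, Dict, Any, Optional, Tuple
--
-- CONTEXT_BUFFER_RATIO = 0.9            # Leave 10% headroom before the hard cap
--
-- MAX_HISTORY_MESSAGES = 8              # System + last N interactions is sufficient
--
-- def _estimate_tokens_from_text(text: str) -> int:
--     """Rough token estimation (fallback when tokenizer metadata is unavailable)."""
--     if not text:
--         return 0
--     # Empirical rule-of-thumb: 1 token ~ 4 characters for mixed text/code.
--     return max(1, len(text) // 4)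
--
-- def _estimate_tokens_from_messages(messages: List[Dict[str, Any]]) -> int:
--     """Estimate total token usage for a sequence of OpenAI-style chat messages."""
--     total = 0
--     for message in messages:
--         content = ""
--         if isinstance(message, dict):
--             content = str(message.get("content", ""))
--         else:
--             content = str(message)
--         total += _estimate_tokens_from_text(content)
--     return total
--
-- def _prune_message_history(
--     messages: List[Dict[str, Any]],
--     max_tokens: int,
--     preserve_tail: int = 0
-- ) -> List[Dict[str, Any]]:
--     """
--     Trim conversation history so only the system prompt + most recent exchanges remain.
--
--     This keeps Discovery batches lightweight while still allowing the LLM to see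
--     the latest tool interaction if needed.
--     """
--     if not messages or max_tokens <= 0:
--         return messages
--
--     system_messages = [msg for msg in messages if isinstance(msg, dict) and msg.get("role") == "system"]
--     non_system = [msg for msg in messages if not (isinstance(msg, dict) and msg.get("role") == "system")]
--
--     # Keep system prompt (first occurrence) and the most recent interactions.
--     pruned: List[Dict[str, Any]] = []
--     if system_messages:
--         pruned.append(system_messages[0])
--
--     pruned.extend(non_system[-MAX_HISTORY_MESSAGES:])
--
--     token_budget = int(max_tokens * CONTEXT_BUFFER_RATIO)
--     if token_budget <= 0:
--         return pruned
--
--     # Drop the oldest non-system messages until we fit within the budget.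
--     while len(pruned) > 1 and _estimate_tokens_from_messages(pruned) > token_budget:
--         # Never drop the final message (current user request). Remove the oldest non-system entry.
--         # pruned[0] is system -> start from index 1.
--         if len(pruned) <= 2:
--             break
--         non_system_count = len(pruned) - 1
--         if preserve_tail and non_system_count <= preserve_tail:
--             break
--         pruned.pop(1)
--
--     return pruned
-- ===== SOURCE B (Python) =====
-- MAX_HISTORY_MESSAGES = 8
-- CONTEXT_BUFFER_RATIO = 0.9
--
-- def _prune_message_history(messages, max_tokens, preserve_tail=0):
--     """Single-pass pruning: partition once, estimate each message's cost once,
--     then slice off the oldest non-system entries using a running total instead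
--     of repeatedly re-summing and popping."""
--     if not messages or max_tokens <= 0:
--         return messages
--
--     system, rest = [], []
--     for msg in messages:
--         (system if isinstance(msg, dict) and msg.get("role") == "system" else rest).append(msg)
--
--     pruned = system[:1] + rest[-MAX_HISTORY_MESSAGES:]
--
--     token_budget = int(max_tokens * CONTEXT_BUFFER_RATIO)
--     if token_budget <= 0:
--         return pruned
--
--     def cost(msg):
--         text = str(msg.get("content", "")) if isinstance(msg, dict) else str(msg)
--         return 0 if not text else max(1, len(text) // 4)
--
--     costs = [cost(m) for m in pruned]
--     min_len = max(2, preserve_tail + 1)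
--     remaining = sum(costs)
--     drop = 0
--     while len(pruned) - drop > min_len and remaining > token_budget:
--         remaining -= costs[1 + drop]
--         drop += 1
--     return pruned[:1] + pruned[1 + drop:]
-- ===== Notes on version B (the rewrite author's own statement) =====
-- stated objective: alternative
-- what changed: Replaces A's pop-and-resum while loop (which re-walks the pruned window to re-estimate tokens on every iteration and mutates it with pop(1)) by a single partition pass, one per-message cost list computed once, and a running-total walk that finds the cut index, returning one final slice.
import Mathlib
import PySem

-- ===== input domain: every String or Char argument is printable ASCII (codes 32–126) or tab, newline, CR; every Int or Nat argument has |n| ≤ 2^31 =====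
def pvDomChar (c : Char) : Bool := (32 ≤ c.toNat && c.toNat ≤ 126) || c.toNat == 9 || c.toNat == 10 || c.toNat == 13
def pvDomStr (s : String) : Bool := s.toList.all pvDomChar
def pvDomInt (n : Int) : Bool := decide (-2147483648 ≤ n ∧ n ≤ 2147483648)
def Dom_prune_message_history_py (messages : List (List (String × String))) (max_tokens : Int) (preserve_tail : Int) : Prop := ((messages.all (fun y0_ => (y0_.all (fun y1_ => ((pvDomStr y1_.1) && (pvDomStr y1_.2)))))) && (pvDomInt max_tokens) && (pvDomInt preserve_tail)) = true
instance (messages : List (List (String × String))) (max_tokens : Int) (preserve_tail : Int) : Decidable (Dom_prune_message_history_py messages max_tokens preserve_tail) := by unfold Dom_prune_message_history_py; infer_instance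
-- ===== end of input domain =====

-- B is a one-pass re-implementation: costs are estimated once and the cut point found with a
-- running total, instead of A's re-summing + pop loop; return values proved equal on all inputs.

-- ===== PORT A =====

-- token_budget = int(max_tokens * 0.9): truncation toward zero of the exact 9n/10 — for
-- |n| ≤ 2^31 the double product rounds to within far less than the distance to the next
-- integer boundary, so this integer formula is exact on the stated domain.
def pvBudget (n : Int) : Int :=
  if 0 ≤ n then PySem.Int.floordiv (9 * n) 10 else -(PySem.Int.floordiv (9 * (-n)) 10)

-- msg.get(k) (first match on the association list) and msg.get(k, "")
def pvGetRole (m : List (String × String)) : Option String := m.lookup "role"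
def pvGetContent (m : List (String × String)) : String := (m.lookup "content").getD ""

-- _estimate_tokens_from_text
def estimate_tokens_from_text_py (text : String) : Int :=
  if text = "" then 0 else max 1 (PySem.Int.floordiv (PySem.Str.len text) 4)

-- _estimate_tokens_from_messages (content = str(message.get("content", "")); values are strings)
def estimate_tokens_from_messages_py (messages : List (List (String × String))) : Int :=
  messages.foldl (fun total m => total + estimate_tokens_from_text_py (pvGetContent m)) 0

-- the while loop: pop(1) while over budget, respecting the len<=2 and preserve_tail floors
def pruneLoopA (budget preserve_tail : Int) (pruned : List (List (String × String))) :
    List (List (String × String)) :=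
  if 1 < pruned.length ∧ budget < estimate_tokens_from_messages_py pruned then
    if pruned.length ≤ 2 then pruned
    else if preserve_tail ≠ 0 ∧ ((pruned.length : Int) - 1) ≤ preserve_tail then pruned
    else
      match pruned with
      | a :: _ :: rest => pruneLoopA budget preserve_tail (a :: rest)
      | l => l
  else pruned
termination_by pruned.length
decreasing_by simp_all

def prune_message_history_py (messages : List (List (String × String))) (max_tokens : Int) (preserve_tail : Int) : List (List (String × String)) :=
  if messages = [] ∨ max_tokens ≤ 0 then messages
  else
    let system_messages := messages.filter (fun m => pvGetRole m == some "system")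
    let non_system := messages.filter (fun m => !(pvGetRole m == some "system"))
    let pruned := (match system_messages with | [] => [] | s :: _ => [s]) ++
                  PySem.List.slice non_system (some (-8)) none
    let token_budget := pvBudget max_tokens
    if token_budget ≤ 0 then pruned
    else pruneLoopA token_budget preserve_tail pruned

-- ===== PORT B =====

-- per-message cost (same estimate, computed once per message in B)
def pvAltCost (m : List (String × String)) : Int :=
  if (m.lookup "content").getD "" = "" then 0
  else max 1 (PySem.Int.floordiv (PySem.Str.len ((m.lookup "content").getD "")) 4)

-- Source B's while loop over the precomputed cost list: walks costs[1+drop:] with the running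
-- total; curLen = len(pruned) - drop. Recursion on the cost-list suffix is the index walk.
def dropWalk (budget min_len : Int) (curLen remaining : Int) (tcosts : List Int) : Nat :=
  match tcosts with
  | [] => 0
  | c :: restc =>
      if min_len < curLen ∧ budget < remaining then
        dropWalk budget min_len (curLen - 1) (remaining - c) restc + 1
      else 0

def prune_message_history_py_alt (messages : List (List (String × String))) (max_tokens : Int) (preserve_tail : Int) : List (List (String × String)) :=
  if messages = [] ∨ max_tokens ≤ 0 then messages
  else
    let parts := messages.foldl
      (fun (acc : List (List (String × String)) × List (List (String × String))) m =>
        if m.lookup "role" == some "system" then (acc.1 ++ [m], acc.2) else (acc.1, acc.2 ++ [m]))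
      ([], [])
    let pruned := parts.1.take 1 ++ PySem.List.slice parts.2 (some (-8)) none
    let token_budget := pvBudget max_tokens
    if token_budget ≤ 0 then pruned
    else
      let costs := pruned.map pvAltCost
      let min_len := max 2 (preserve_tail + 1)
      let drop := dropWalk token_budget min_len (pruned.length : Int) costs.sum (costs.drop 1)
      pruned.take 1 ++ pruned.drop (1 + drop)

-- ===== PRECONDITION & SPEC =====
def Spec_prune_message_history_py (messages : List (List (String × String))) (max_tokens : Int) (preserve_tail : Int) (out : List (List (String × String))) : Prop := out = prune_message_history_py_alt messages max_tokens preserve_tail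
instance (messages : List (List (String × String))) (max_tokens : Int) (preserve_tail : Int) (out : List (List (String × String))) : Decidable (Spec_prune_message_history_py messages max_tokens preserve_tail out) := by unfold Spec_prune_message_history_py; infer_instance

-- ===== CLAIM (what is proved, stated in full; the proofs are below) =====
def Claim_equal_prune_message_history_py : Prop := ∀ (messages : List (List (String × String))) (max_tokens : Int) (preserve_tail : Int), Dom_prune_message_history_py messages max_tokens preserve_tail → Spec_prune_message_history_py messages max_tokens preserve_tail (prune_message_history_py messages max_tokens preserve_tail)

-- ===== LEMMAS AND PROOFS =====

theorem est_aux (l : List (List (String × String))) (s : Int) :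
    l.foldl (fun total m => total + estimate_tokens_from_text_py (pvGetContent m)) s
      = s + (l.map pvAltCost).sum := by
  induction l generalizing s with
  | nil => simp
  | cons a t ih =>
      simp only [List.foldl_cons, List.map_cons, List.sum_cons, ih]
      have h : estimate_tokens_from_text_py (pvGetContent a) = pvAltCost a := by
        simp [estimate_tokens_from_text_py, pvGetContent, pvAltCost]
      rw [h]; ring

theorem est_eq_sum (l : List (List (String × String))) :
    estimate_tokens_from_messages_py l = (l.map pvAltCost).sum := by
  simpa using est_aux l 0

theorem loop_eq_walk (budget pt : Int) (a : List (String × String))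
    (t : List (List (String × String))) :
    pruneLoopA budget pt (a :: t) =
      a :: t.drop (dropWalk budget (max 2 (pt + 1)) (((a :: t).length : Nat) : Int)
        (((a :: t).map pvAltCost).sum) (t.map pvAltCost)) := by
  induction t with
  | nil =>
      rw [pruneLoopA]
      simp [dropWalk]
      intro x y z h
      simp at h
  | cons b rest ih =>
      rw [pruneLoopA, est_eq_sum]
      by_cases hbud : budget < ((a :: b :: rest).map pvAltCost).sum
      · rw [if_pos ⟨(by simp : 1 < (a :: b :: rest).length), hbud⟩]
        cases rest with
        | nil =>
            rw [if_pos (by simp)]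
            simp only [List.map_cons, List.map_nil]
            rw [dropWalk]
            rw [if_neg (fun h => by
              have h2 := le_max_left (2 : Int) (pt + 1)
              have h1 := h.1
              simp only [List.length_cons, List.length_nil] at h1
              push_cast at h1
              omega)]
            simp
        | cons c rest' =>
            rw [if_neg (by simp)]
            by_cases hpt : pt ≠ 0 ∧ (((a :: b :: c :: rest').length : Int) - 1) ≤ pt
            · rw [if_pos hpt]
              have hstop : ¬ (max 2 (pt + 1) < (((a :: b :: c :: rest').length : Nat) : Int)) := by
                have h2 := hpt.2
                simp only [max_lt_iff, not_and_or, not_lt]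
                right
                omega
              simp only [List.map_cons]
              rw [dropWalk]
              rw [if_neg (fun h => hstop h.1)]
              simp
            · rw [if_neg hpt, ih]
              have hgo : max 2 (pt + 1) < (((a :: b :: c :: rest').length : Nat) : Int) := by
                simp only [List.length_cons] at hpt ⊢
                simp only [max_lt_iff]
                push_cast
                omega
              simp only [List.map_cons] at hbud ⊢
              conv_rhs => rw [dropWalk]
              rw [if_pos ⟨hgo, hbud⟩]
              have e1 : (((a :: b :: c :: rest').length : Nat) : Int) - 1
                  = (((a :: c :: rest').length : Nat) : Int) := by
                simp only [List.length_cons]; push_cast; ring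
              have e2 : (pvAltCost a :: pvAltCost b :: pvAltCost c :: List.map pvAltCost rest').sum
                    - pvAltCost b
                  = (pvAltCost a :: pvAltCost c :: List.map pvAltCost rest').sum := by
                simp only [List.sum_cons]; ring
              rw [e1, e2]
              rw [List.drop_succ_cons]
      · rw [if_neg (fun h => hbud h.2)]
        simp only [List.map_cons] at hbud ⊢
        rw [dropWalk]
        rw [if_neg (fun h => hbud h.2)]
        simp

theorem partition_aux (messages : List (List (String × String)))
    (s r : List (List (String × String))) :
    (messages.foldl
      (fun (acc : List (List (String × String)) × List (List (String × String))) m =>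
        if m.lookup "role" == some "system" then (acc.1 ++ [m], acc.2) else (acc.1, acc.2 ++ [m]))
      (s, r)) =
    (s ++ messages.filter (fun m => pvGetRole m == some "system"),
     r ++ messages.filter (fun m => !(pvGetRole m == some "system"))) := by
  induction messages generalizing s r with
  | nil => simp
  | cons m t ih =>
      rw [List.foldl_cons]
      by_cases h : (m.lookup "role" == some "system") = true
      · rw [if_pos h, ih]
        simp [pvGetRole, h]
      · rw [if_neg h, ih]
        simp only [Bool.not_eq_true] at h
        simp [pvGetRole, h]

theorem take_one_match (l : List (List (String × String))) :
    (match l with | [] => ([] : List (List (String × String))) | s :: _ => [s]) = l.take 1 := by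
  cases l <;> rfl

theorem loop_eq_alt_tail (budget pt : Int) (pruned : List (List (String × String))) :
    pruneLoopA budget pt pruned =
      pruned.take 1 ++ pruned.drop (1 + dropWalk budget (max 2 (pt + 1))
        ((pruned.length : Nat) : Int) ((pruned.map pvAltCost).sum)
        ((pruned.map pvAltCost).drop 1)) := by
  cases pruned with
  | nil =>
      rw [pruneLoopA]
      simp
      intro x y z h
      simp at h
  | cons a t =>
      rw [loop_eq_walk]
      simp [Nat.add_comm 1]

-- ===== VERDICT (by name: the statement is the Claim_ definition above) =====
theorem prune_message_history_py_spec : Claim_equal_prune_message_history_py := by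
  intro messages max_tokens preserve_tail _hdom
  unfold Spec_prune_message_history_py prune_message_history_py prune_message_history_py_alt
  by_cases h0 : messages = [] ∨ max_tokens ≤ 0
  · rw [if_pos h0, if_pos h0]
  · rw [if_neg h0, if_neg h0]
    simp only [partition_aux, List.nil_append, take_one_match]
    by_cases hb : pvBudget max_tokens ≤ 0
    · rw [if_pos hb, if_pos hb]
    · rw [if_neg hb, if_neg hb, loop_eq_alt_tail]
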